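-- pv_equiv track=rewrite | github.com/DrMiracle/Dictionaries | PermutermIndex.py | match_with_wildcards
-- ===== SOURCE A (Python) =====
-- def match_with_wildcards(term, query_parts):
--     # Check if the term matches the query with wildcards
--     start = 0
--     for part in query_parts:
--         idx = term.find(part, start)
--         if idx == -1:
--             return False
--         start = idx + len(part)
--     return True
-- ===== SOURCE B (Python) =====
-- def _rk_find(t, p, start):
--     # Rabin-Karp: rolling polynomial hash over the current window, with a
--     # direct comparison on hash hits, so the leftmost occurrence is exact.
--     n, m = len(t), len(p)
--     if m == 0:
--         return start
--     if start + m > n: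
--         return -1
--     BASE, MOD = 257, 1000000007
--     hp = 0
--     for c in p:
--         hp = (hp * BASE + ord(c)) % MOD
--     h = 0
--     for c in t[start:start + m]:
--         h = (h * BASE + ord(c)) % MOD
--     pw = 1
--     for _ in range(m - 1):
--         pw = pw * BASE % MOD
--     for i in range(start, n - m + 1):
--         if h == hp and t[i:i + m] == p:
--             return i
--         if i + m < n:
--             h = ((h + ord(t[i]) * (MOD - pw)) * BASE + ord(t[i + m])) % MOD
--     return -1
--
--
-- def match_with_wildcards(term, query_parts):
--     # Check if the term matches the query with wildcards:
--     # consume the parts queue front to back, advancing pos past each match.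
--     pos = 0
--     remaining = list(query_parts)
--     while remaining:
--         part = remaining.pop(0)
--         i = _rk_find(term, part, pos)
--         if i < 0:
--             return False
--         pos = i + len(part)
--     return True
-- ===== Notes on version B (the rewrite author's own statement) =====
-- stated objective: alternative
-- what changed: B replaces the built-in naive substring search term.find(part, start) by a hand-written Rabin-Karp search: each part is located via a rolling polynomial hash of the current window (base 257 mod 10^9+7), comparing characters only on hash hits, which avoids re-scanning the part at every offset.
import Mathlib
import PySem

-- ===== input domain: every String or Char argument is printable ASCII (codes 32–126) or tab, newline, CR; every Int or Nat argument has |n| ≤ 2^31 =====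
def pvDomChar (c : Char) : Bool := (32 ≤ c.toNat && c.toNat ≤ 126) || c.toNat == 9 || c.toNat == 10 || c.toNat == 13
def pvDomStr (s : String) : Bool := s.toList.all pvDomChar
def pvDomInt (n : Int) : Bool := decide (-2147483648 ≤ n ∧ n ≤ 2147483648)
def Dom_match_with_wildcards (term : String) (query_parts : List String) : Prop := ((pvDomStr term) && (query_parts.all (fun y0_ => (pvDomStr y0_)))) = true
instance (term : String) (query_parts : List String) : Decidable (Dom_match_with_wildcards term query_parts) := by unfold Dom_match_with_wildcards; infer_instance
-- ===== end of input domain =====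

-- B replaces the built-in substring search term.find(part, start) by a hand-written
-- Rabin-Karp search (rolling polynomial hash, direct comparison on hash hits);
-- alternative algorithm, same results.


-- ===== PORT A =====
-- the 'for part in query_parts' loop with early 'return False', carrying 'start'
def matchGoA : String → List String → Int → Bool
  | _, [], _ => true
  | term, part :: tl, start =>
    let idx := PySem.Str.findFrom term part start   -- term.find(part, start)
    if idx = -1 then false
    else matchGoA term tl (idx + PySem.Str.len part)

def match_with_wildcards (term : String) (query_parts : List String) : Bool :=
  matchGoA term query_parts 0

-- ===== PORT B =====
-- B's Rabin-Karp helper _rk_find, transliterated over List Char.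
-- rkHash: the 'h = (h * BASE + ord(c)) % MOD' folds computing hp and the first window hash
def rkHash (acc : Nat) (cs : List Char) : Nat :=
  cs.foldl (fun a c => (a * 257 + c.toNat) % 1000000007) acc

-- the 'pw = pw * BASE % MOD' loop (pw = 1; for _ in range(m-1): ...)
def rkPow : Nat → Nat
  | 0 => 1
  | e + 1 => rkPow e * 257 % 1000000007

-- the 'for i in range(start, n - m + 1)' loop; fuel = number of remaining iterations;
-- t[i:i+m] == p is (t.drop i).take m == p (nonnegative slice bounds, exact);
-- ord(t[i]) is (t.getD i default).toNat — the loop only reads indexes < t.length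
def rkLoop (t p : List Char) (hp pw : Nat) : Nat → Nat → Nat → Int
  | _, _, 0 => -1
  | i, h, cnt + 1 =>
    if h == hp && ((t.drop i).take p.length == p) then (i : Int)
    else
      rkLoop t p hp pw (i + 1)
        (if i + p.length < t.length then
          ((h + (t.getD i default).toNat * (1000000007 - pw)) * 257
            + (t.getD (i + p.length) default).toNat) % 1000000007
         else h) cnt

def rkFind (t p : List Char) (start : Nat) : Int :=
  if p.length = 0 then (start : Int)
  else if t.length < start + p.length then -1
  else
    rkLoop t p (rkHash 0 p) (rkPow (p.length - 1)) start
      (rkHash 0 ((t.drop start).take p.length))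
      (t.length - p.length + 1 - start)

-- B's 'while remaining: part = remaining.pop(0)' loop: structural recursion on the
-- remaining parts queue, carrying pos (a nonnegative index, kept as Nat)
def matchGoB (t : List Char) : List String → Nat → Bool
  | [], _ => true
  | part :: tl, pos =>
    let i := rkFind t part.toList pos
    if i < 0 then false
    else matchGoB t tl (i.toNat + part.toList.length)

def match_with_wildcards_alt (term : String) (query_parts : List String) : Bool :=
  matchGoB term.toList query_parts 0

-- ===== PRECONDITION & SPEC =====
def Spec_match_with_wildcards (term : String) (query_parts : List String) (out : Bool) : Prop := out = match_with_wildcards_alt term query_parts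
instance (term : String) (query_parts : List String) (out : Bool) : Decidable (Spec_match_with_wildcards term query_parts out) := by unfold Spec_match_with_wildcards; infer_instance

-- ===== CLAIM (what is proved, stated in full; the proofs are below) =====
def Claim_equal_match_with_wildcards : Prop := ∀ (term : String) (query_parts : List String), Dom_match_with_wildcards term query_parts → Spec_match_with_wildcards term query_parts (match_with_wildcards term query_parts)

-- ===== LEMMAS AND PROOFS =====

-- the hash computations in ZMod 10^9+7
def zhF (a : ZMod 1000000007) (cs : List Char) : ZMod 1000000007 :=
  cs.foldl (fun a c => a * 257 + (c.toNat : ZMod 1000000007)) a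

lemma rkPow_lt (e : Nat) : rkPow e < 1000000007 := by
  cases e with
  | zero => norm_num [rkPow]
  | succ e => exact Nat.mod_lt _ (by norm_num)

lemma rkPow_cast (e : Nat) : ((rkPow e : Nat) : ZMod 1000000007) = 257 ^ e := by
  induction e with
  | zero => simp [rkPow]
  | succ e ih =>
    simp only [rkPow, ZMod.natCast_mod, Nat.cast_mul, ih]
    push_cast
    ring

lemma rkHash_lt (cs : List Char) : ∀ acc, cs ≠ [] → rkHash acc cs < 1000000007 := by
  induction cs with
  | nil => intro acc h; exact absurd rfl h
  | cons c tl ih =>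
    intro acc _
    rw [rkHash, List.foldl_cons]
    cases tl with
    | nil => exact Nat.mod_lt _ (by omega)
    | cons d tl' => exact ih _ (List.cons_ne_nil _ _)

lemma rkHash_cast (cs : List Char) : ∀ acc, ((rkHash acc cs : Nat) : ZMod 1000000007) = zhF (acc : ZMod 1000000007) cs := by
  induction cs with
  | nil => intro acc; rfl
  | cons c tl ih =>
    intro acc
    simp only [rkHash, List.foldl_cons, zhF] at *
    rw [ih, ZMod.natCast_mod]
    push_cast
    rfl

lemma zhF_shift (cs : List Char) : ∀ a, zhF a cs = a * 257 ^ cs.length + zhF 0 cs := by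
  induction cs with
  | nil => intro a; simp [zhF]
  | cons c tl ih =>
    intro a
    simp only [zhF, List.foldl_cons] at *
    rw [ih (a * 257 + _), ih (0 * 257 + _)]
    simp only [List.length_cons]
    ring

-- the two decompositions of consecutive windows
lemma window_cons (t : List Char) (i m : Nat) (hm : 1 ≤ m) (hi : i < t.length) :
    (t.drop i).take m = t[i] :: (t.drop (i + 1)).take (m - 1) := by
  obtain ⟨m', rfl⟩ : ∃ m', m = m' + 1 := ⟨m - 1, by omega⟩
  rw [List.drop_eq_getElem_cons hi, List.take_succ_cons]
  simp

lemma window_snoc (t : List Char) (i m : Nat) (hm : 1 ≤ m) (hn : i + 1 + m ≤ t.length) :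
    (t.drop (i + 1)).take m = (t.drop (i + 1)).take (m - 1) ++ [t[i + m]'(by omega)] := by
  obtain ⟨m', rfl⟩ : ∃ m', m = m' + 1 := ⟨m - 1, by omega⟩
  rw [List.take_add_one]
  congr 1
  have h' : m' < (t.drop (i + 1)).length := by rw [List.length_drop]; omega
  rw [List.getElem?_eq_getElem h']
  simp only [List.getElem_drop, Option.toList_some]
  simp only [show i + 1 + m' = i + (m' + 1) from by omega]

-- rolling-hash step at the ZMod level
lemma zh_roll (t : List Char) (i m : Nat) (hm : 1 ≤ m) (hn : i + m < t.length) :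
    zhF 0 ((t.drop (i + 1)).take m) =
      (zhF 0 ((t.drop i).take m) - ((t.getD i default).toNat : ZMod 1000000007) * 257 ^ (m - 1)) * 257
        + ((t.getD (i + m) default).toNat : ZMod 1000000007) := by
  have hi : i < t.length := by omega
  have him : i + m < t.length := hn
  rw [window_cons t i m hm hi, window_snoc t i m hm (by omega)]
  have hu : ((t.drop (i + 1)).take (m - 1)).length = m - 1 := by
    rw [List.length_take, List.length_drop]; omega
  simp only [zhF, List.foldl_cons, List.foldl_append, List.foldl_nil]
  rw [show (0 : ZMod 1000000007) * 257 + (t[i].toNat : ZMod 1000000007)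
        = ((0 : ZMod 1000000007) * 257 + (t[i].toNat : ZMod 1000000007)) from rfl]
  have h1 := zhF_shift ((t.drop (i + 1)).take (m - 1)) ((0 : ZMod 1000000007) * 257 + (t[i].toNat : ZMod 1000000007))
  simp only [zhF] at h1
  rw [h1, hu]
  rw [List.getD_eq_getElem t default hi, List.getD_eq_getElem t default him]
  ring

-- Nat-side rolling step: the updated h in rkLoop is the hash of the next window
lemma rk_step (t : List Char) (i m h : Nat) (hm : 1 ≤ m) (hn : i + m < t.length)
    (hh : h = rkHash 0 ((t.drop i).take m)) :
    ((h + (t.getD i default).toNat * (1000000007 - rkPow (m - 1))) * 257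
      + (t.getD (i + m) default).toNat) % 1000000007
      = rkHash 0 ((t.drop (i + 1)).take m) := by
  haveI : NeZero (1000000007 : Nat) := ⟨by norm_num⟩
  set M : Nat := 1000000007 with hM
  have hlt1 : ((h + (t.getD i default).toNat * (M - rkPow (m - 1))) * 257
      + (t.getD (i + m) default).toNat) % M < M := Nat.mod_lt _ (by norm_num)
  have hne2 : (t.drop (i + 1)).take m ≠ [] := by
    have : i + 1 < t.length := by omega
    simp [List.take_eq_nil_iff, List.drop_eq_nil_iff]
    omega
  have hlt2 : rkHash 0 ((t.drop (i + 1)).take m) < M := rkHash_lt _ 0 hne2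
  have hcast : ((((h + (t.getD i default).toNat * (M - rkPow (m - 1))) * 257
      + (t.getD (i + m) default).toNat) % M : Nat) : ZMod M)
      = ((rkHash 0 ((t.drop (i + 1)).take m) : Nat) : ZMod M) := by
    rw [ZMod.natCast_mod, rkHash_cast]
    have hpw : (rkPow (m - 1) : Nat) ≤ M := le_of_lt (rkPow_lt _)
    push_cast [Nat.cast_sub hpw]
    rw [show ((M : Nat) : ZMod M) = 0 from ZMod.natCast_self M]
    rw [zh_roll t i m hm hn, hh, rkHash_cast, rkPow_cast]
    push_cast
    ring
  have := congrArg (ZMod.val (n := M)) hcast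
  rwa [ZMod.val_natCast_of_lt hlt1, ZMod.val_natCast_of_lt hlt2] at this

-- the naive scan with the same loop shape as rkLoop, hash stripped
def nscan (t p : List Char) : Nat → Nat → Int
  | _, 0 => -1
  | i, cnt + 1 =>
    if (t.drop i).take p.length == p then (i : Int) else nscan t p (i + 1) cnt

-- rkLoop equals the naive scan: the hash check never rejects a real match
lemma rkLoop_eq_nscan (t p : List Char) (hp : 1 ≤ p.length) (hmn : p.length ≤ t.length) :
    ∀ cnt i h, i + cnt = t.length - p.length + 1 →
      (i + p.length ≤ t.length → h = rkHash 0 ((t.drop i).take p.length)) →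
      rkLoop t p (rkHash 0 p) (rkPow (p.length - 1)) i h cnt = nscan t p i cnt := by
  intro cnt
  induction cnt with
  | zero => intro i h _ _; rfl
  | succ cnt ih =>
    intro i h hfuel hh
    have him : i + p.length ≤ t.length := by omega
    have hh' := hh him
    rw [rkLoop, nscan]
    by_cases hw : (t.drop i).take p.length = p
    · have : h = rkHash 0 p := by rw [hh', hw]
      simp [hw, this]
    · have hbeq : ((t.drop i).take p.length == p) = false := beq_eq_false_iff_ne.mpr hw
      rw [hbeq, Bool.and_false, if_neg Bool.false_ne_true]
      apply ih (i + 1) _ (by omega)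
      intro h2
      have hlt : i + p.length < t.length := by omega
      rw [if_pos hlt]
      exact rk_step t i p.length h hp hlt hh'

-- prefix at j ↔ the scanned window equals p
lemma window_eq_iff_prefix (t p : List Char) (j : Nat) :
    (t.drop j).take p.length = p ↔ p <+: t.drop j := by
  constructor
  · intro h; rw [← h]; exact List.take_prefix _ _
  · intro h; exact ((List.prefix_iff_eq_take.mp h)).symm

lemma nscan_none (t p : List Char) :
    ∀ cnt i, (∀ j, i ≤ j → ¬ p <+: t.drop j) → nscan t p i cnt = -1 := by
  intro cnt
  induction cnt with
  | zero => intro i _; rfl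
  | succ cnt ih =>
    intro i hnone
    rw [nscan]
    have : ¬ (t.drop i).take p.length = p := fun h =>
      hnone i le_rfl ((window_eq_iff_prefix t p i).mp h)
    simp only [beq_iff_eq, if_neg this]
    exact ih (i + 1) (fun j hj => hnone j (by omega))

lemma nscan_hit (t p : List Char) (r : Nat) (hocc : p <+: t.drop r) :
    ∀ cnt i, i ≤ r → r < i + cnt → (∀ j, i ≤ j → j < r → ¬ p <+: t.drop j) →
      nscan t p i cnt = (r : Int) := by
  intro cnt
  induction cnt with
  | zero => intro i _ h _; omega
  | succ cnt ih =>
    intro i hir hri hmin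
    rw [nscan]
    by_cases hieq : i = r
    · subst hieq
      rw [if_pos (by simpa [beq_iff_eq] using (window_eq_iff_prefix t p i).mpr hocc)]
    · have : ¬ (t.drop i).take p.length = p := fun h =>
        hmin i le_rfl (by omega) ((window_eq_iff_prefix t p i).mp h)
      simp only [beq_iff_eq, if_neg this]
      exact ih (i + 1) (by omega) (by omega) (fun j hj1 hj2 => hmin j (by omega) hj2)

-- the central lemma: B's Rabin-Karp find equals Python's str.find(sub, start)
lemma rkFind_eq (t p : List Char) (k : Nat) (hk : k ≤ t.length) :
    rkFind t p k = PySem.Chars.findFrom t p (k : Int) := by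
  rw [rkFind]
  by_cases hp0 : p.length = 0
  · have hpnil : p = [] := List.eq_nil_of_length_eq_zero hp0
    subst hpnil
    rw [PySem.Chars.findFrom_natCast t [] k hk, PySem.Chars.find_nil]
    simp
  · rw [if_neg hp0]
    by_cases hfit : t.length < k + p.length
    · rw [if_pos hfit]
      symm
      rw [PySem.Chars.findFrom_natCast_eq_neg_one_iff t p k hk]
      intro hinf
      have := hinf.length_le
      rw [List.length_drop] at this
      omega
    · rw [if_neg hfit]
      rw [not_lt] at hfit
      have hp1 : 1 ≤ p.length := by omega
      have hscan := rkLoop_eq_nscan t p hp1 (by omega) (t.length - p.length + 1 - k) k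
        (rkHash 0 ((t.drop k).take p.length)) (by omega) (fun _ => rfl)
      rw [hscan]
      by_cases hres : PySem.Chars.findFrom t p (k : Int) = -1
      · rw [hres]
        have hnone := (PySem.Chars.findFrom_natCast_eq_neg_one_iff t p k hk).mp hres
        apply nscan_none
        intro j hjk hpre
        apply hnone
        have hdj : t.drop j = (t.drop k).drop (j - k) := by
          rw [List.drop_drop]; congr 1; omega
        rw [hdj] at hpre
        exact hpre.isInfix.trans (List.drop_suffix _ _).isInfix
      · obtain ⟨hge, hpre, hmin⟩ := PySem.Chars.findFrom_natCast_spec t p k hk hres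
        set f := PySem.Chars.findFrom t p (k : Int) with hf
        have hfnn : (0 : Int) ≤ f := le_trans (by positivity) hge
        set r := f.toNat with hr
        have hrk : k ≤ r := by omega
        have hrlen : r + p.length ≤ t.length := by
          have := hpre.length_le
          rw [List.length_drop] at this
          have hrn : r < t.length := by
            by_contra hge'
            rw [not_lt] at hge'
            have : t.drop r = [] := List.drop_eq_nil_of_le hge'
            rw [this] at hpre
            have := hpre.length_le
            simp at this
            omega
          omega
        have := nscan_hit t p r hpre (t.length - p.length + 1 - k) k hrk (by omega)
          (fun j hj1 hj2 => hmin j hj1 hj2)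
        rw [this, hr, Int.toNat_of_nonneg hfnn]

-- rkFind returns -1 or an in-range match position
lemma rkFind_bounds (t p : List Char) (k : Nat) (hk : k ≤ t.length)
    (hne : rkFind t p k ≠ -1) :
    0 ≤ rkFind t p k ∧ (rkFind t p k).toNat + p.length ≤ t.length := by
  rw [rkFind_eq t p k hk] at *
  obtain ⟨hge, hpre, _⟩ := PySem.Chars.findFrom_natCast_spec t p k hk hne
  have hfnn : (0 : Int) ≤ PySem.Chars.findFrom t p (k : Int) := le_trans (by positivity) hge
  refine ⟨hfnn, ?_⟩
  by_cases hp0 : p = []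
  · subst hp0
    rw [PySem.Chars.findFrom_natCast t [] k hk, PySem.Chars.find_nil] at *
    simp at *
    omega
  · have := hpre.length_le
    rw [List.length_drop] at this
    have hrn : (PySem.Chars.findFrom t p (k : Int)).toNat < t.length := by
      by_contra hge'
      rw [not_lt] at hge'
      rw [List.drop_eq_nil_of_le hge'] at hpre
      have := hpre.length_le
      simp at this
      exact hp0 this
    omega

-- invariant: A at Int start k equals B at Nat start k
lemma matchGo_eq (term : String) (qs : List String) : ∀ (k : Nat), k ≤ term.toList.length →
    matchGoA term qs (k : Int) = matchGoB term.toList qs k := by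
  induction qs with
  | nil => intro k _; rfl
  | cons p tl ih =>
    intro k hk
    rw [matchGoA, matchGoB]
    simp only [PySem.Str.findFrom_eq]
    rw [← rkFind_eq term.toList p.toList k hk]
    by_cases hne : rkFind term.toList p.toList k = -1
    · simp [hne]
    · obtain ⟨hnn, hlen⟩ := rkFind_bounds term.toList p.toList k hk hne
      simp only [if_neg hne, if_neg (not_lt.mpr hnn)]
      have hcast : rkFind term.toList p.toList k + PySem.Str.len p
          = (((rkFind term.toList p.toList k).toNat + p.toList.length : Nat) : Int) := by
        rw [PySem.Str.len_eq]
        push_cast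
        omega
      rw [hcast, ih _ hlen]

theorem match_with_wildcards_spec : Claim_equal_match_with_wildcards := by
  intro term qs _
  unfold Spec_match_with_wildcards match_with_wildcards match_with_wildcards_alt
  have h := matchGo_eq term qs 0 (Nat.zero_le _)
  simpa using h
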